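-- pv_equiv track=rewrite | github.com/parsifar/watch-scraper | backend/relevance.py | base_model
-- ===== SOURCE A (Python) =====
-- def base_model(token: str) -> str:
--     """
--     Extract the base model for comparison.
--
--     Logic:
--     - Take starting letters
--     - Take first numeric sequence
--     - Ignore extra suffix letters/digits
--     """
--     letters = []
--     digits = []
--     found_digit = False
--
--     for c in token:
--         if c.isalpha() and not found_digit:
--             letters.append(c)
--         elif c.isdigit():
--             digits.append(c)
--             found_digit = True
--         elif found_digit:
--             # stop at first non-digit after numeric sequence
--             break
--
--     return "".join(letters + digits)
-- ===== SOURCE B (Python) =====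
-- def base_model(token: str) -> str:
--     idx = next((i for i, c in enumerate(token) if c.isdigit()), None)
--     if idx is None:
--         return "".join(c for c in token if c.isalpha())
--     letters = "".join(c for c in token[:idx] if c.isalpha())
--     digits = []
--     for c in token[idx:]:
--         if not c.isdigit():
--             break
--         digits.append(c)
--     return letters + "".join(digits)
-- ===== Notes on version B (the rewrite author's own statement) =====
-- stated objective: alternative
-- what changed: Replaces A's single stateful scan (found_digit flag, mid-loop break) with a decomposition: locate the first digit index, then filter letters from the prefix and take the leading digit run of the suffix.
import Mathlib
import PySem

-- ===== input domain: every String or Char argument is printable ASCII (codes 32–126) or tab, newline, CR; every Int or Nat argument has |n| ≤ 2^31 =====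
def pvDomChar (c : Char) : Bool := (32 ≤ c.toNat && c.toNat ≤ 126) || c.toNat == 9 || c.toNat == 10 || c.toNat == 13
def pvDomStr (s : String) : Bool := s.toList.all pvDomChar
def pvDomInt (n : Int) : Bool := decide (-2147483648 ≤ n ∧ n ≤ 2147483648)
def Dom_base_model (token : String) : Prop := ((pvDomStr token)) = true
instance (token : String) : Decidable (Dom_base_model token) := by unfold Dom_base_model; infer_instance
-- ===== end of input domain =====

-- B replaces A's single stateful scan (found_digit flag + break) with a first-digit-index
-- decomposition (filter letters from the prefix, leading digit run of the suffix); alternative, same cost.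

-- ===== PORT A =====
-- A's loop: letters/digits accumulators, found_digit flag, break at first non-digit after digits.
def pvAGo : List Char → List Char → List Char → Bool → List Char
  | [], letters, digits, _ => letters ++ digits
  | c :: cs, letters, digits, foundDigit =>
    if PySem.Chars.isalpha c && !foundDigit then
      pvAGo cs (letters ++ [c]) digits foundDigit
    else if PySem.Chars.isdigit c then
      pvAGo cs letters (digits ++ [c]) true
    else if foundDigit then
      letters ++ digits  -- break
    else
      pvAGo cs letters digits foundDigit

def base_model (token : String) : String :=
  String.ofList (pvAGo token.toList [] [] false)

-- ===== PORT B =====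
-- B's digit-collecting loop over token[idx:] (break at first non-digit).
def pvBDigits : List Char → List Char → List Char
  | [], acc => acc
  | c :: cs, acc =>
    if !PySem.Chars.isdigit c then acc  -- break
    else pvBDigits cs (acc ++ [c])

def base_model_alt (token : String) : String :=
  let l := token.toList
  match l.findIdx? PySem.Chars.isdigit with
  | none => String.ofList (l.filter PySem.Chars.isalpha)
  | some idx =>
      String.ofList ((l.take idx).filter PySem.Chars.isalpha ++ pvBDigits (l.drop idx) [])

-- ===== PRECONDITION & SPEC =====
def Spec_base_model (token : String) (out : String) : Prop := out = base_model_alt token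
instance (token : String) (out : String) : Decidable (Spec_base_model token out) := by unfold Spec_base_model; infer_instance

-- ===== CLAIM (what is proved, stated in full; the proofs are below) =====
def Claim_equal_base_model : Prop := ∀ (token : String), Dom_base_model token → Spec_base_model token (base_model token)

-- ===== LEMMAS AND PROOFS =====

theorem pv_disj (c : Char) (h : PySem.Chars.isdigit c = true) : PySem.Chars.isalpha c = false := by
  simp [PySem.Chars.isalpha, PySem.Chars.isdigit, PySem.Chars.isupper, PySem.Chars.islower,
        Char.le_def, UInt32.le_iff_toNat_le] at *
  omega

theorem pvBDigits_acc (cs : List Char) : ∀ acc, pvBDigits cs acc = acc ++ pvBDigits cs [] := by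
  induction cs with
  | nil => intro acc; simp [pvBDigits]
  | cons c cs ih =>
    intro acc
    by_cases h : PySem.Chars.isdigit c
    · simp only [pvBDigits, h, Bool.not_true, Bool.false_eq_true, if_false, List.nil_append]
      rw [ih ([c]), ih (acc ++ [c])]
      simp
    · simp [pvBDigits, h]

theorem pvAGo_found (cs : List Char) : ∀ letters digits,
    pvAGo cs letters digits true = letters ++ digits ++ pvBDigits cs [] := by
  induction cs with
  | nil => intro letters digits; simp [pvAGo, pvBDigits]
  | cons c cs ih =>
    intro letters digits
    by_cases h : PySem.Chars.isdigit c
    · simp only [pvAGo, pvBDigits, h, Bool.not_true, Bool.and_false, Bool.false_eq_true,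
        if_false, if_true, List.nil_append]
      rw [ih, pvBDigits_acc cs [c]]
      simp
    · simp [pvAGo, pvBDigits, h]

theorem pvAGo_notfound (cs : List Char) : ∀ letters,
    pvAGo cs letters [] false = letters ++
      (match cs.findIdx? PySem.Chars.isdigit with
       | none => cs.filter PySem.Chars.isalpha
       | some idx => (cs.take idx).filter PySem.Chars.isalpha ++ pvBDigits (cs.drop idx) []) := by
  induction cs with
  | nil => intro letters; simp [pvAGo]
  | cons c cs ih =>
    intro letters
    by_cases hd : PySem.Chars.isdigit c
    · have hfi : (c :: cs).findIdx? PySem.Chars.isdigit = some 0 := by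
        simp [List.findIdx?_cons, hd]
      have ha : PySem.Chars.isalpha c = false := pv_disj c hd
      simp only [pvAGo, hfi, ha, Bool.false_and, Bool.false_eq_true, if_false, hd, if_true]
      rw [pvAGo_found]
      simp only [List.take_zero, List.filter_nil, List.drop_zero, List.nil_append,
        List.append_assoc]
      simp [pvBDigits, hd, pvBDigits_acc cs [c]]
    · have hfi : (c :: cs).findIdx? PySem.Chars.isdigit
          = (cs.findIdx? PySem.Chars.isdigit).map (· + 1) := by
        simp [List.findIdx?_cons, hd]
      by_cases ha : PySem.Chars.isalpha c
      · simp only [pvAGo, ha, Bool.not_false, Bool.and_true, if_true, hfi]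
        rw [ih]
        cases h : cs.findIdx? PySem.Chars.isdigit with
        | none => simp [ha]
        | some i => simp [ha]
      · simp only [pvAGo, ha, Bool.false_and, Bool.false_eq_true, if_false, hd, hfi]
        rw [ih]
        cases h : cs.findIdx? PySem.Chars.isdigit with
        | none => simp [ha]
        | some i => simp [ha]

-- ===== VERDICT (by name: the statement is the Claim_ definition above) =====
theorem base_model_spec : Claim_equal_base_model := by
  intro token _
  unfold Spec_base_model base_model base_model_alt
  rw [pvAGo_notfound]
  cases h : token.toList.findIdx? PySem.Chars.isdigit <;> simp [h]
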